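-- pv_equiv track=rewrite | github.com/fsawadogo/aurion | backend/app/api/v1/privacy.py | _determine_voice_enrollment_status
-- ===== SOURCE A (Python) =====
-- from typing import Any
--
-- def _determine_voice_enrollment_status(events: list[dict[str, Any]]) -> str:
--     """Determine voice enrollment status from audit log events.
--
--     Returns 'enrolled', 'deleted', or 'not_enrolled'.
--     """
--     enrolled = False
--     deleted = False
--     for e in sorted(events, key=lambda x: x.get("event_timestamp", "")):
--         etype = e.get("event_type", "")
--         if etype == "voice_enrollment_complete":
--             enrolled = True
--             deleted = False
--         elif etype == "voice_enrollment_deleted":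
--             deleted = True
--             enrolled = False
--
--     if deleted:
--         return "deleted"
--     if enrolled:
--         return "enrolled"
--     return "not_enrolled"
-- ===== SOURCE B (Python) =====
-- from typing import Any
--
-- def _determine_voice_enrollment_status(events: list[dict[str, Any]]) -> str:
--     """Determine voice enrollment status from audit log events.
--
--     Single pass: keep the relevant event with the greatest timestamp
--     (later list position wins ties, matching a stable sort's last element).
--     """
--     best = None
--     for e in events:
--         etype = e.get("event_type", "")
--         if etype == "voice_enrollment_complete" or etype == "voice_enrollment_deleted":
--             if best is None or best.get("event_timestamp", "") <= e.get("event_timestamp", ""):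
--                 best = e
--     if best is None:
--         return "not_enrolled"
--     if best.get("event_type", "") == "voice_enrollment_deleted":
--         return "deleted"
--     return "enrolled"
-- ===== Notes on version B (the rewrite author's own statement) =====
-- stated objective: alternative
-- what changed: Replaces sort-then-replay of all events with a single pass that keeps the relevant event with the greatest (timestamp, position); no sort and no enrolled/deleted state machine.
import Mathlib
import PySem

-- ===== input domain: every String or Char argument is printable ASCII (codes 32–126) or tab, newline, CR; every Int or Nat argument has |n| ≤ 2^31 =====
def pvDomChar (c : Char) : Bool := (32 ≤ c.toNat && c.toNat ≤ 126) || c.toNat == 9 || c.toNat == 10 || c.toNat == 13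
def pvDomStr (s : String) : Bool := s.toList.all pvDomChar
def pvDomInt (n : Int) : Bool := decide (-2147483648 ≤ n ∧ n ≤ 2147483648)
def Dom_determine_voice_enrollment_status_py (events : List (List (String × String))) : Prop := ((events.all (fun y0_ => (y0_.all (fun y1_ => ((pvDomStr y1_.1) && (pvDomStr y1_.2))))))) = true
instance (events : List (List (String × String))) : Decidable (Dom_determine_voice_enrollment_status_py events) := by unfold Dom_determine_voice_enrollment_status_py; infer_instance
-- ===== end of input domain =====

-- B replaces sort-then-replay with a single pass keeping the relevant event of greatest (timestamp, position): no sort, no state machine.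

-- ===== PORT A =====
-- e.get("event_timestamp", "") / e.get("event_type", "")
def pvTs (e : List (String × String)) : String := PySem.Dict.getD ⟨e⟩ "event_timestamp" ""
def pvEt (e : List (String × String)) : String := PySem.Dict.getD ⟨e⟩ "event_type" ""

-- the body of A's for-loop over the state (enrolled, deleted)
def pvStepA (s : Bool × Bool) (e : List (String × String)) : Bool × Bool :=
  if pvEt e == "voice_enrollment_complete" then (true, false)
  else if pvEt e == "voice_enrollment_deleted" then (false, true)
  else s

def determine_voice_enrollment_status_py (events : List (List (String × String))) : String :=
  let st := (PySem.List.sorted events pvTs false).foldl pvStepA (false, false)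
  if st.2 then "deleted" else if st.1 then "enrolled" else "not_enrolled"

-- ===== PORT B =====
-- the body of B's for-loop over the current best relevant event
def pvStepB (b : Option (List (String × String))) (e : List (String × String)) : Option (List (String × String)) :=
  if pvEt e == "voice_enrollment_complete" || pvEt e == "voice_enrollment_deleted" then
    match b with
    | none => some e
    | some be => if pvTs be ≤ pvTs e then some e else some be
  else b

def determine_voice_enrollment_status_py_alt (events : List (List (String × String))) : String :=
  match events.foldl pvStepB none with
  | none => "not_enrolled"
  | some be => if pvEt be == "voice_enrollment_deleted" then "deleted" else "enrolled"

-- ===== PRECONDITION & SPEC =====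
def Spec_determine_voice_enrollment_status_py (events : List (List (String × String))) (out : String) : Prop := out = determine_voice_enrollment_status_py_alt events
instance (events : List (List (String × String))) (out : String) : Decidable (Spec_determine_voice_enrollment_status_py events out) := by unfold Spec_determine_voice_enrollment_status_py; infer_instance

-- ===== CLAIM (what is proved, stated in full; the proofs are below) =====
def Claim_equal_determine_voice_enrollment_status_py : Prop := ∀ (events : List (List (String × String))), Dom_determine_voice_enrollment_status_py events → Spec_determine_voice_enrollment_status_py events (determine_voice_enrollment_status_py events)

-- ===== LEMMAS AND PROOFS =====

-- "is a relevant event"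
def pvRel (e : List (String × String)) : Bool :=
  pvEt e == "voice_enrollment_complete" || pvEt e == "voice_enrollment_deleted"

lemma pv_getLast?_cons {α : Type} (y : α) (L : List α) (h : L ≠ []) :
    (y :: L).getLast? = L.getLast? := by
  cases L with
  | nil => exact absurd rfl h
  | cons a t => exact List.getLast?_cons_cons ..

lemma pv_insertBy_ne_nil (x : List (String × String)) (ys : List (List (String × String))) :
    PySem.List.insertBy (fun a b => decide (pvTs a < pvTs b)) x ys ≠ [] := by
  cases ys with
  | nil => simp [PySem.List.insertBy]
  | cons y t => simp only [PySem.List.insertBy]; split <;> simp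

lemma pv_insertBy_getLast? (x : List (String × String)) (ys : List (List (String × String)))
    (h : ys.Pairwise (fun a b => pvTs a ≤ pvTs b)) :
    (PySem.List.insertBy (fun a b => decide (pvTs a < pvTs b)) x ys).getLast? =
      (match ys.getLast? with
       | none => some x
       | some l => if pvTs l ≤ pvTs x then some x else some l) := by
  induction ys with
  | nil => simp [PySem.List.insertBy]
  | cons y t ih =>
    rw [List.pairwise_cons] at h
    simp only [PySem.List.insertBy]
    by_cases hb : pvTs x < pvTs y
    · simp only [hb, decide_true, if_true]
      rw [List.getLast?_cons_cons]
      cases hl : (y :: t).getLast? with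
      | none => simp at hl
      | some l =>
        have hml : l ∈ y :: t := List.mem_of_getLast? hl
        have hyl : pvTs y ≤ pvTs l := by
          rcases List.mem_cons.mp hml with rfl | hm
          · exact le_refl _
          · exact h.1 l hm
        have hnot : ¬ pvTs l ≤ pvTs x := by
          intro hle; exact absurd (lt_of_lt_of_le hb hyl) (not_lt.mpr hle)
        simp [hnot]
    · simp only [hb, decide_false, Bool.false_eq_true, if_false]
      rw [pv_getLast?_cons _ _ (pv_insertBy_ne_nil x t), ih h.2]
      cases t with
      | nil => simp [not_lt.mp hb]
      | cons z t' => rw [List.getLast?_cons_cons]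

lemma pv_filter_insertBy (p : List (String × String) → Bool) (x : List (String × String))
    (ys : List (List (String × String))) (h : ys.Pairwise (fun a b => pvTs a ≤ pvTs b)) :
    (PySem.List.insertBy (fun a b => decide (pvTs a < pvTs b)) x ys).filter p =
      if p x then PySem.List.insertBy (fun a b => decide (pvTs a < pvTs b)) x (ys.filter p)
      else ys.filter p := by
  induction ys with
  | nil =>
    by_cases hpx : p x <;>
      simp only [PySem.List.insertBy, List.filter_nil, List.filter_cons, hpx, if_true, if_false,
        Bool.false_eq_true]
  | cons y t ih =>
    rw [List.pairwise_cons] at h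
    by_cases hb : pvTs x < pvTs y
    · rw [show PySem.List.insertBy (fun a b => decide (pvTs a < pvTs b)) x (y :: t) = x :: y :: t
        from by simp only [PySem.List.insertBy, hb, decide_true, if_true]]
      by_cases hpx : p x
      · rw [List.filter_cons_of_pos hpx, if_pos hpx]
        by_cases hpy : p y
        · rw [List.filter_cons_of_pos hpy,
            show PySem.List.insertBy (fun a b => decide (pvTs a < pvTs b)) x (y :: t.filter p)
              = x :: y :: t.filter p
            from by simp only [PySem.List.insertBy, hb, decide_true, if_true]]
        · rw [List.filter_cons_of_neg hpy]
          cases hft : t.filter p with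
          | nil => rfl
          | cons z r =>
            have hz : z ∈ t := (List.mem_filter.mp (hft ▸ List.mem_cons_self)).1
            have hxz : pvTs x < pvTs z := lt_of_lt_of_le hb (h.1 z hz)
            rw [show PySem.List.insertBy (fun a b => decide (pvTs a < pvTs b)) x (z :: r)
              = x :: z :: r from by simp only [PySem.List.insertBy, hxz, decide_true, if_true]]
      · rw [List.filter_cons_of_neg hpx, if_neg hpx]
    · rw [show PySem.List.insertBy (fun a b => decide (pvTs a < pvTs b)) x (y :: t)
        = y :: PySem.List.insertBy (fun a b => decide (pvTs a < pvTs b)) x t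
        from by simp only [PySem.List.insertBy, hb, decide_false, Bool.false_eq_true, if_false]]
      by_cases hpy : p y
      · rw [List.filter_cons_of_pos hpy, ih h.2, List.filter_cons_of_pos hpy]
        by_cases hpx : p x
        · rw [if_pos hpx, if_pos hpx,
            show PySem.List.insertBy (fun a b => decide (pvTs a < pvTs b)) x (y :: t.filter p)
              = y :: PySem.List.insertBy (fun a b => decide (pvTs a < pvTs b)) x (t.filter p)
            from by simp only [PySem.List.insertBy, hb, decide_false, Bool.false_eq_true, if_false]]
        · rw [if_neg hpx, if_neg hpx]
      · rw [List.filter_cons_of_neg hpy, List.filter_cons_of_neg hpy, ih h.2]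

lemma pv_sorted_filter (p : List (String × String) → Bool) (xs : List (List (String × String))) :
    (PySem.List.sorted xs pvTs false).filter p = PySem.List.sorted (xs.filter p) pvTs false := by
  induction xs using List.reverseRecOn with
  | nil => simp [PySem.List.sorted_eq_foldl_insertBy]
  | append_singleton xs x ih =>
    rw [PySem.List.sorted_eq_foldl_insertBy, List.foldl_append, List.foldl_cons, List.foldl_nil,
      ← PySem.List.sorted_eq_foldl_insertBy,
      pv_filter_insertBy p x _ (PySem.List.sorted_pairwise xs pvTs), ih, List.filter_append]
    by_cases hpx : p x
    · simp only [List.filter_cons, hpx, if_true, List.filter_nil]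
      rw [PySem.List.sorted_eq_foldl_insertBy (xs.filter p ++ [x]), List.foldl_append,
        List.foldl_cons, List.foldl_nil, ← PySem.List.sorted_eq_foldl_insertBy]
    · simp [hpx]

lemma pv_foldl_skip {β : Type} (f : β → List (String × String) → β)
    (hf : ∀ s e, pvRel e = false → f s e = s) (s : β) (ys : List (List (String × String))) :
    ys.foldl f s = (ys.filter pvRel).foldl f s := by
  induction ys generalizing s with
  | nil => rfl
  | cons y t ih =>
    by_cases hy : pvRel y = true
    · simp [hy, List.foldl_cons, ih]
    · simp only [Bool.not_eq_true] at hy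
      simp [hy, List.foldl_cons, hf s y hy, ih]

lemma pv_foldA_last (rs : List (List (String × String))) (h : ∀ e ∈ rs, pvRel e = true)
    (s : Bool × Bool) :
    rs.foldl pvStepA s =
      (match rs.getLast? with
       | none => s
       | some l => if pvEt l == "voice_enrollment_complete" then (true, false) else (false, true)) := by
  induction rs using List.reverseRecOn with
  | nil => rfl
  | append_singleton rs x ih =>
    have hx : pvRel x = true := h x (by simp)
    rw [List.foldl_append, List.foldl_cons, List.foldl_nil, List.getLast?_concat]
    simp only [pvRel, Bool.or_eq_true] at hx
    by_cases hc : pvEt x == "voice_enrollment_complete"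
    · simp [pvStepA, hc]
    · have hd : (pvEt x == "voice_enrollment_deleted") = true := by
        rcases hx with h1 | h1
        · exact absurd h1 hc
        · exact h1
      simp [pvStepA, hc, hd]

lemma pv_foldB_sorted (rs : List (List (String × String))) (h : ∀ e ∈ rs, pvRel e = true) :
    rs.foldl pvStepB none = (PySem.List.sorted rs pvTs false).getLast? := by
  induction rs using List.reverseRecOn with
  | nil => simp [PySem.List.sorted_eq_foldl_insertBy]
  | append_singleton rs x ih =>
    have hx : pvRel x = true := h x (by simp)
    have hrs : ∀ e ∈ rs, pvRel e = true := fun e he => h e (by simp [he])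
    rw [List.foldl_append, List.foldl_cons, List.foldl_nil, ih hrs,
      PySem.List.sorted_eq_foldl_insertBy (rs ++ [x]), List.foldl_append, List.foldl_cons,
      List.foldl_nil, ← PySem.List.sorted_eq_foldl_insertBy,
      pv_insertBy_getLast? x _ (PySem.List.sorted_pairwise rs pvTs)]
    simp only [pvRel] at hx
    simp only [pvStepB, hx, if_true]

-- ===== VERDICT (by name: the statement is the Claim_ definition above) =====
theorem determine_voice_enrollment_status_py_spec : Claim_equal_determine_voice_enrollment_status_py := by
  intro events _
  unfold Spec_determine_voice_enrollment_status_py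
  unfold determine_voice_enrollment_status_py determine_voice_enrollment_status_py_alt
  have hA : ∀ s e, pvRel e = false → pvStepA s e = s := by
    intro s e he
    simp only [pvRel, Bool.or_eq_false_iff] at he
    simp [pvStepA, he.1, he.2]
  have hB : ∀ (b : Option (List (String × String))) e, pvRel e = false → pvStepB b e = b := by
    intro b e he
    simp only [pvRel] at he
    simp [pvStepB, he]
  rw [pv_foldl_skip pvStepA hA, pv_sorted_filter, pv_foldA_last _ (by intro e he; exact (List.mem_filter.mp ((PySem.List.mem_sorted _ _ _ _).mp he)).2)]
  rw [pv_foldl_skip pvStepB hB, pv_foldB_sorted _ (by intro e he; exact (List.mem_filter.mp he).2)]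
  cases hl : (PySem.List.sorted (events.filter pvRel) pvTs false).getLast? with
  | none => simp
  | some l =>
    have hmem : l ∈ PySem.List.sorted (events.filter pvRel) pvTs false := List.mem_of_getLast? hl
    have hrel : pvRel l = true := by
      have := (PySem.List.mem_sorted _ _ _ _).mp hmem
      exact (List.mem_filter.mp this).2
    simp only [pvRel, Bool.or_eq_true] at hrel
    by_cases hc : pvEt l == "voice_enrollment_complete"
    · have hd : (pvEt l == "voice_enrollment_deleted") = false := by
        rw [beq_iff_eq] at hc; simp [hc]
      simp [hc, hd]
    · have hd : pvEt l == "voice_enrollment_deleted" := by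
        rcases hrel with h1 | h1
        · exact absurd h1 hc
        · exact h1
      simp [hc, hd]
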